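-- pv_equiv track=rewrite | github.com/oliben67/my_libs | lists/inserts.py | insert_after
-- ===== SOURCE A (Python) =====
-- from itertools import groupby
--
-- def flatten(lst):
--     """
--     Flattens a nested list into a single list.
--
--     :param lst: The nested list to be flattened.
--     :type lst: ``lst``
--     :rtype: ``lst``
--     """
--     return [elem for sub_list in lst for elem in sub_list]
--
-- def insert_after(lst, sub, elem, _all=False):
--     """
--     Inserts the elements of the 'sub' list after the first occurrence of 'elem' in the 'lst' list.
--     If '_all' is True, inserts 'sub' after all occurrences of 'elem' in 'lst'.
--
--     :param lst: The list to insert into.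
--     :type lst: ``lst``
--     :param sub: The list to insert.
--     :type sub: ``lst``
--     :param elem: The element to search for in 'lst'.
--     :type elem: ``Any``
--     :param _all: If True, insert after all occurrences of 'elem'. Defaults to False.
--     :type _all: ``bool``
--     :rtype: ``lst``
--     """
--     if isinstance(lst, str):
--         return insert_after(
--             [c for c in lst],
--             [c for c in sub] if isinstance(sub, str) else sub,
--             elem,
--             _all=_all,
--         )
--
--     if not _all:
--         idx = lst.index(elem)
--         return lst[: idx + 1] + sub + lst[idx + 1 :]
--
--     split_lst = [
--         list(group if not k else []) for k, group in groupby(lst, lambda x: x == elem)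
--     ]
--     return flatten(
--         [
--             sub_list + [elem] + sub if not sub_list else sub_list
--             for sub_list in split_lst
--         ]
--     )
-- ===== SOURCE B (Python) =====
-- def insert_after(lst, sub, elem, _all=False):
--     if isinstance(lst, str):
--         lst = [c for c in lst]
--         if isinstance(sub, str):
--             sub = [c for c in sub]
--     result = []
--     done = False
--     for x in lst:
--         result.append(x)
--         if x == elem and not done:
--             result.extend(sub)
--             if not _all:
--                 done = True
--     return result
-- ===== Notes on version B (the rewrite author's own statement) =====
-- stated objective: simpler
-- what changed: Replaces both the index/slice arithmetic and the groupby/comprehension/flatten pipeline with one streaming pass that copies elements and appends sub right after an occurrence of elem (every occurrence when _all, only the first otherwise), avoiding the intermediate group lists and the extra flatten pass.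
-- intended difference: With _all=True on lists containing consecutive occurrences of elem, A collapses each run of equal elems to a single elem followed by sub (e.g. [1,1,2] -> [1,9,2]), dropping elements; B inserts sub after every occurrence and keeps all elements ([1,9,1,9,2]), which is what 'insert after all occurrences' intends. — e.g. on insert_after([1, 1, 2], [9], 1, true): A returns [1, 9, 2], B returns [1, 9, 1, 9, 2]
-- crash fix: With _all=False and elem not present in lst, A raises ValueError from lst.index; B returns the list unchanged. — e.g. on insert_after([2, 3], [4], 1, false): A raises ValueError, B returns [2, 3]
import Mathlib
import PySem

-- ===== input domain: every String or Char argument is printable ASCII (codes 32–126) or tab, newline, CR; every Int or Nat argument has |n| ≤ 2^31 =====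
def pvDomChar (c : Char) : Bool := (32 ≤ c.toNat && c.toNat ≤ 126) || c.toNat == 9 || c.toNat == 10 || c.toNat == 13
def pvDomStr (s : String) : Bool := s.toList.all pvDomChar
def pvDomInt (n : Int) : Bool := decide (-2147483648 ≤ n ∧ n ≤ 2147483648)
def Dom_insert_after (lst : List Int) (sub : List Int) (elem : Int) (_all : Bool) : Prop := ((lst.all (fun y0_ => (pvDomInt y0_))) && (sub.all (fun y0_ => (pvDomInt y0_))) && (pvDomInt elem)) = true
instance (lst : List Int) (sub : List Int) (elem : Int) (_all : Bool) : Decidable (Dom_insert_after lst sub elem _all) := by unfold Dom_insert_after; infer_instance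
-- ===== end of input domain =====

-- B replaces the non-_all index/slice arithmetic and the _all groupby/flatten pipeline by one
-- streaming pass that appends sub after occurrences of elem; B inserts after EVERY occurrence
-- where A collapses a run of consecutive elems into one (see D_ below).

-- ===== PORT A =====
-- itertools.groupby with key (x == elem): consecutive runs of equal key, in order
def pvGroupby (elem : Int) : List Int → List (Bool × List Int)
  | [] => []
  | x :: xs =>
    (x == elem, x :: xs.takeWhile (fun y => (y == elem) == (x == elem))) ::
      pvGroupby elem (xs.dropWhile (fun y => (y == elem) == (x == elem)))
  termination_by l => l.length
  decreasing_by
    have := List.length_dropWhile_le (fun y => (y == elem) == (x == elem)) xs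
    simp [List.length_cons]; omega

-- helper 'flatten' of the module (list comprehension)
def pvFlatten (lst : List (List Int)) : List Int := lst.flatMap (fun s => s)

def insert_after (lst : List Int) (sub : List Int) (elem : Int) (_all : Bool) : List Int :=
  if _all = false then
    match PySem.List.index? lst elem with
    | none => []  -- lst.index(elem) raises ValueError here; excluded by Pre_
    | some idx =>
        PySem.List.slice lst none (some ((idx : Int) + 1)) ++ sub ++
          PySem.List.slice lst (some ((idx : Int) + 1)) none
  else
    let split_lst := (pvGroupby elem lst).map (fun kg => if kg.1 then [] else kg.2)
    pvFlatten (split_lst.map (fun s => if s.isEmpty then s ++ [elem] ++ sub else s))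

-- ===== PORT B =====
def insert_after_alt (lst : List Int) (sub : List Int) (elem : Int) (_all : Bool) : List Int :=
  (lst.foldl
    (fun (st : List Int × Bool) x =>
      let result := st.1 ++ [x]
      if x == elem && !st.2 then
        (result ++ sub, if _all then st.2 else true)
      else
        (result, st.2))
    ([], false)).1

-- ===== PRECONDITION & SPEC =====
-- Pre_ excludes exactly the inputs where A raises ValueError: _all = False and elem not in lst
def Pre_insert_after (lst : List Int) (sub : List Int) (elem : Int) (_all : Bool) : Prop :=
  _all = true ∨ elem ∈ lst
instance (lst : List Int) (sub : List Int) (elem : Int) (_all : Bool) : Decidable (Pre_insert_after lst sub elem _all) := by unfold Pre_insert_after; infer_instance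
def pvWitness_insert_after : List Int × List Int × Int × Bool := ([1, 2], [3], 1, false)

-- With _all=True on a list containing consecutive occurrences of elem, A collapses each such run
-- to a single elem followed by sub (dropping the duplicates), while B inserts sub after every
-- occurrence and keeps all elements, which is what "insert after all occurrences" intends.
def D_insert_after (lst : List Int) (sub : List Int) (elem : Int) (_all : Bool) : Prop :=
  _all = true ∧ ∃ p ∈ lst.zip lst.tail, p.1 = elem ∧ p.2 = elem
instance (lst : List Int) (sub : List Int) (elem : Int) (_all : Bool) : Decidable (D_insert_after lst sub elem _all) := by unfold D_insert_after; infer_instance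

def Spec_insert_after (lst : List Int) (sub : List Int) (elem : Int) (_all : Bool) (out : List Int) : Prop := ¬ D_insert_after lst sub elem _all → out = insert_after_alt lst sub elem _all
instance (lst : List Int) (sub : List Int) (elem : Int) (_all : Bool) (out : List Int) : Decidable (Spec_insert_after lst sub elem _all out) := by unfold Spec_insert_after; infer_instance

def pvDiffWitness_insert_after : List Int × List Int × Int × Bool := ([1, 1, 2], [9], 1, true)
def pvDiffWitnessOut_insert_after : (List Int) × (List Int) := ([1, 9, 2], [1, 9, 1, 9, 2])

-- On _all=False with elem not in lst, A raises ValueError (from lst.index) while B returns lst unchanged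
def Raises_insert_after (lst : List Int) (sub : List Int) (elem : Int) (_all : Bool) : Prop :=
  _all = false ∧ elem ∉ lst
instance (lst : List Int) (sub : List Int) (elem : Int) (_all : Bool) : Decidable (Raises_insert_after lst sub elem _all) := by unfold Raises_insert_after; infer_instance
def pvRaiseWitness_insert_after : List Int × List Int × Int × Bool := ([2, 3], [4], 1, false)
def pvRaiseWitnessOut_insert_after : List Int := [2, 3]

-- ===== CLAIM (what is proved, stated in full; the proofs are below) =====
def Claim_unchanged_insert_after : Prop := ∀ (lst : List Int) (sub : List Int) (elem : Int) (_all : Bool), Dom_insert_after lst sub elem _all → Pre_insert_after lst sub elem _all → Spec_insert_after lst sub elem _all (insert_after lst sub elem _all)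
def Claim_changed_insert_after : Prop := Dom_insert_after (pvDiffWitness_insert_after.1) (pvDiffWitness_insert_after.2.1) (pvDiffWitness_insert_after.2.2.1) (pvDiffWitness_insert_after.2.2.2) ∧ Pre_insert_after (pvDiffWitness_insert_after.1) (pvDiffWitness_insert_after.2.1) (pvDiffWitness_insert_after.2.2.1) (pvDiffWitness_insert_after.2.2.2) ∧ D_insert_after (pvDiffWitness_insert_after.1) (pvDiffWitness_insert_after.2.1) (pvDiffWitness_insert_after.2.2.1) (pvDiffWitness_insert_after.2.2.2) ∧ insert_after (pvDiffWitness_insert_after.1) (pvDiffWitness_insert_after.2.1) (pvDiffWitness_insert_after.2.2.1) (pvDiffWitness_insert_after.2.2.2) = pvDiffWitnessOut_insert_after.1 ∧ insert_after_alt (pvDiffWitness_insert_after.1) (pvDiffWitness_insert_after.2.1) (pvDiffWitness_insert_after.2.2.1) (pvDiffWitness_insert_after.2.2.2) = pvDiffWitnessOut_insert_after.2 ∧ pvDiffWitnessOut_insert_after.1 ≠ pvDiffWitnessOut_insert_after.2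
def Claim_exact_insert_after : Prop := ∀ (lst : List Int) (sub : List Int) (elem : Int) (_all : Bool), Dom_insert_after lst sub elem _all → Pre_insert_after lst sub elem _all → D_insert_after lst sub elem _all → insert_after lst sub elem _all ≠ insert_after_alt lst sub elem _all
def Claim_raises_insert_after : Prop := (∀ (lst : List Int) (sub : List Int) (elem : Int) (_all : Bool), Dom_insert_after lst sub elem _all → Raises_insert_after lst sub elem _all → ¬ Pre_insert_after lst sub elem _all) ∧ (Dom_insert_after (pvRaiseWitness_insert_after.1) (pvRaiseWitness_insert_after.2.1) (pvRaiseWitness_insert_after.2.2.1) (pvRaiseWitness_insert_after.2.2.2) ∧ Raises_insert_after (pvRaiseWitness_insert_after.1) (pvRaiseWitness_insert_after.2.1) (pvRaiseWitness_insert_after.2.2.1) (pvRaiseWitness_insert_after.2.2.2) ∧ insert_after_alt (pvRaiseWitness_insert_after.1) (pvRaiseWitness_insert_after.2.1) (pvRaiseWitness_insert_after.2.2.1) (pvRaiseWitness_insert_after.2.2.2) = pvRaiseWitnessOut_insert_after)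

-- ===== LEMMAS AND PROOFS =====

-- B's fold step
def altF (sub : List Int) (elem : Int) (_all : Bool) (st : List Int × Bool) (x : Int) : List Int × Bool :=
  let result := st.1 ++ [x]
  if x == elem && !st.2 then
    (result ++ sub, if _all then st.2 else true)
  else
    (result, st.2)

lemma alt_eq_foldl (lst sub : List Int) (elem : Int) (_all : Bool) :
    insert_after_alt lst sub elem _all = (lst.foldl (altF sub elem _all) ([], false)).1 := rfl

-- once done=true (only reachable with _all=false) the fold just copies
lemma altF_done (sub : List Int) (elem : Int) (_all : Bool) :
    ∀ (xs acc : List Int), xs.foldl (altF sub elem _all) (acc, true) = (acc ++ xs, true) := by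
  intro xs
  induction xs with
  | nil => intro acc; simp
  | cons x xs ih =>
      intro acc
      simp only [List.foldl_cons, altF]
      simp [ih]

-- while elem has not been met the fold copies
lemma altF_no_elem (sub : List Int) (elem : Int) (_all : Bool) :
    ∀ (xs acc : List Int), elem ∉ xs → xs.foldl (altF sub elem _all) (acc, false) = (acc ++ xs, false) := by
  intro xs
  induction xs with
  | nil => intro acc _; simp
  | cons x xs ih =>
      intro acc h
      have hx : ¬ x = elem := fun he => h (by simp [he])
      simp only [List.foldl_cons, altF]
      rw [if_neg (by simp [hx])]
      rw [ih _ (fun hm => h (List.mem_cons_of_mem _ hm))]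
      simp

-- with _all=true the flag never changes and the fold is a flatMap
lemma altF_all (sub : List Int) (elem : Int) :
    ∀ (xs acc : List Int), xs.foldl (altF sub elem true) (acc, false) =
      (acc ++ xs.flatMap (fun x => if x == elem then x :: sub else [x]), false) := by
  intro xs
  induction xs with
  | nil => intro acc; simp
  | cons x xs ih =>
      intro acc
      by_cases hx : x = elem
      · simp only [List.foldl_cons, altF]
        rw [if_pos (by simp [hx])]
        simp only [if_true]
        rw [ih]
        simp [List.flatMap_cons, hx]
      · simp only [List.foldl_cons, altF]
        rw [if_neg (by simp [hx])]
        rw [ih]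
        simp [List.flatMap_cons, hx]

-- recursive no-adjacent-duplicate-of-elem predicate (proof-side form of ¬ D_)
def noAdj (elem : Int) : List Int → Bool
  | x :: y :: r => !(x == elem && y == elem) && noAdj elem (y :: r)
  | _ => true

lemma noAdj_tail (elem : Int) : ∀ (xs : List Int) (x : Int), noAdj elem (x :: xs) = true → noAdj elem xs = true := by
  intro xs
  cases xs with
  | nil => intro x _; rfl
  | cons y r => intro x h; simp only [noAdj, Bool.and_eq_true] at h; exact h.2

lemma noAdj_dropWhile (elem : Int) (p : Int → Bool) :
    ∀ xs : List Int, noAdj elem xs = true → noAdj elem (xs.dropWhile p) = true := by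
  intro xs
  induction xs with
  | nil => intro _; simp [List.dropWhile, noAdj]
  | cons x xs ih =>
      intro h
      rw [List.dropWhile_cons]
      split
      · exact ih (noAdj_tail elem xs x h)
      · exact h

lemma noAdj_of_not_D (elem : Int) :
    ∀ lst : List Int, (¬ ∃ p ∈ lst.zip lst.tail, p.1 = elem ∧ p.2 = elem) → noAdj elem lst = true := by
  intro lst
  induction lst with
  | nil => intro _; rfl
  | cons x xs ih =>
      intro h
      cases xs with
      | nil => rfl
      | cons y r =>
          simp only [noAdj, Bool.and_eq_true]
          constructor
          · have hxy : ¬ (x = elem ∧ y = elem) := by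
              intro ⟨h1, h2⟩
              refine h ⟨(x, y), ?_, by simp [h1, h2]⟩
              rw [List.tail_cons, List.zip_cons_cons]
              exact List.mem_cons_self
            by_cases h1 : x = elem
            · have h2 : ¬ y = elem := fun h2 => hxy ⟨h1, h2⟩
              simp [h1, h2]
            · simp [h1]
          · apply ih
            rintro ⟨p, hp, he⟩
            refine h ⟨p, ?_, he⟩
            rw [List.tail_cons] at hp ⊢
            rw [List.zip_cons_cons]
            exact List.mem_cons_of_mem _ hp

-- elements of a non-elem takeWhile flatMap to themselves
lemma flatMap_id_of_no_elem (sub : List Int) (elem : Int) :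
    ∀ run : List Int, (∀ y ∈ run, ¬ y = elem) →
      run.flatMap (fun x => if x == elem then x :: sub else [x]) = run := by
  intro run
  induction run with
  | nil => intro _; rfl
  | cons y r ih =>
      intro h
      have hy : ¬ y = elem := h y (List.mem_cons_self)
      simp only [List.flatMap_cons]
      rw [if_neg (by simp [hy] : ¬ ((y == elem) = true))]
      rw [ih (fun z hz => h z (List.mem_cons_of_mem _ hz))]
      rfl

-- A's _all pipeline equals B's flatMap when elem has no adjacent duplicates
lemma Aall_eq (sub : List Int) (elem : Int) :
    ∀ lst : List Int, noAdj elem lst = true →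
      pvFlatten (((pvGroupby elem lst).map (fun kg => if kg.1 then [] else kg.2)).map
          (fun s => if s.isEmpty then s ++ [elem] ++ sub else s)) =
        lst.flatMap (fun x => if x == elem then x :: sub else [x]) := by
  intro lst
  induction hn : lst.length using Nat.strong_induction_on generalizing lst with
  | _ n ih =>
    intro hlst
    cases lst with
    | nil => simp [pvGroupby, pvFlatten]
    | cons x xs =>
      by_cases hx : x = elem
      · -- run of elem: noAdj forces the run to be just [x]
        have htw : xs.takeWhile (fun y => (y == elem) == (x == elem)) = [] := by
          cases xs with
          | nil => rfl
          | cons y r =>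
              simp only [noAdj, Bool.and_eq_true] at hlst
              have hy : ¬ y = elem := by
                rcases hlst with ⟨h1, _⟩
                intro he; rw [hx] at h1; simp [he] at h1
              rw [List.takeWhile_cons]
              simp [hx, hy]
        have hdw : xs.dropWhile (fun y => (y == elem) == (x == elem)) = xs := by
          cases xs with
          | nil => rfl
          | cons y r =>
              simp only [noAdj, Bool.and_eq_true] at hlst
              have hy : ¬ y = elem := by
                rcases hlst with ⟨h1, _⟩
                intro he; rw [hx] at h1; simp [he] at h1
              rw [List.dropWhile_cons]
              simp [hx, hy]
        rw [pvGroupby, htw, hdw]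
        simp only [List.map_cons, hx, beq_self_eq_true, if_pos rfl, pvFlatten,
          List.flatMap_cons, List.isEmpty_nil]
        have := ih xs.length (by subst hn; simp) xs rfl (noAdj_tail elem xs x hlst)
        simp only [pvFlatten] at this
        rw [this]
        simp [hx]
      · -- non-elem group
        have hkey : (x == elem) = false := by simp [hx]
        rw [pvGroupby]
        set run := xs.takeWhile (fun y => (y == elem) == (x == elem)) with hrun
        set rest := xs.dropWhile (fun y => (y == elem) == (x == elem)) with hrest
        have hlen : rest.length ≤ xs.length := List.length_dropWhile_le _ _
        have hNA : noAdj elem rest = true :=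
          noAdj_dropWhile elem _ xs (noAdj_tail elem xs x hlst)
        have hrec := ih rest.length (by subst hn; simp; omega) rest rfl hNA
        simp only [pvFlatten] at hrec ⊢
        simp only [List.map_cons, hkey, Bool.false_eq_true, if_neg not_false,
          List.flatMap_cons, List.isEmpty_cons]
        rw [hrec]
        have hxrr : xs = run ++ rest := (List.takeWhile_append_dropWhile).symm
        have hrunne : ∀ y ∈ run, ¬ y = elem := by
          intro y hy
          have := List.mem_takeWhile_imp hy
          simp [hkey] at this
          exact this
        rw [hxrr, List.flatMap_append, flatMap_id_of_no_elem sub elem run hrunne]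
        simp [hx]


-- ===== tightness: inside D_ the outputs have different lengths =====

lemma noAdj_dropWhile_false (elem : Int) (p : Int → Bool) (hp : ∀ y, p y = true → ¬ y = elem) :
    ∀ xs : List Int, noAdj elem xs = false → noAdj elem (xs.dropWhile p) = false := by
  intro xs
  induction xs with
  | nil => intro h; simp [noAdj] at h
  | cons y ys ih =>
      intro h
      rw [List.dropWhile_cons]
      split
      · next hpy =>
          apply ih
          cases ys with
          | nil => simp [noAdj] at h
          | cons z r =>
              have hy : ¬ y = elem := hp y hpy
              have hb : (y == elem && z == elem) = false := by simp [hy]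
              simp only [noAdj, hb, Bool.not_false, Bool.true_and] at h
              exact h
      · exact h

lemma noAdj_true_no_adj (elem : Int) :
    ∀ lst : List Int, noAdj elem lst = true →
      ∀ p ∈ lst.zip lst.tail, ¬ (p.1 = elem ∧ p.2 = elem) := by
  intro lst
  induction lst with
  | nil => intro _ p hp; simp at hp
  | cons x xs ih =>
      intro h p hp
      cases xs with
      | nil => simp at hp
      | cons y r =>
          rw [List.tail_cons, List.zip_cons_cons] at hp
          simp only [noAdj, Bool.and_eq_true] at h
          rcases List.mem_cons.mp hp with hp1 | hp2
          · subst hp1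
            intro ⟨h1, h2⟩
            have h1' : x = elem := h1
            have h2' : y = elem := h2
            rcases h with ⟨hb, _⟩
            rw [h1', h2'] at hb
            simp at hb
          · exact ih h.2 p (by rw [List.tail_cons]; exact hp2)

-- A's _all output is never longer than B's
lemma Aall_len_le (sub : List Int) (elem : Int) :
    ∀ lst : List Int,
      (pvFlatten (((pvGroupby elem lst).map (fun kg => if kg.1 then [] else kg.2)).map
          (fun s => if s.isEmpty then s ++ [elem] ++ sub else s))).length ≤
        (lst.flatMap (fun x => if x == elem then x :: sub else [x])).length := by
  intro lst
  induction hn : lst.length using Nat.strong_induction_on generalizing lst with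
  | _ n ih =>
    cases lst with
    | nil => simp [pvGroupby, pvFlatten]
    | cons x xs =>
      rw [pvGroupby]
      set run := xs.takeWhile (fun y => (y == elem) == (x == elem)) with hrun
      set rest := xs.dropWhile (fun y => (y == elem) == (x == elem)) with hrest
      have hxrr : xs = run ++ rest := (List.takeWhile_append_dropWhile).symm
      have hlen : rest.length ≤ xs.length := List.length_dropWhile_le _ _
      have hrec := ih rest.length (by subst hn; simp; omega) rest rfl
      simp only [pvFlatten] at hrec
      by_cases hx : x = elem
      · have hxe : (x == elem) = true := by simp [hx]
        have e1 : (if (x == elem) = true then ([] : List Int) else x :: run) = [] := if_pos hxe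
        have e2 : (if ([] : List Int).isEmpty = true then elem :: sub else []) =
            elem :: sub := if_pos rfl
        have e3 : (if (x == elem) = true then x :: sub else [x]) = x :: sub := if_pos hxe
        rw [hxrr]
        simp only [List.map_cons, pvFlatten, List.flatMap_cons, e1, e2, e3, List.nil_append,
          List.singleton_append, List.flatMap_append, List.length_append, List.length_cons]
        omega
      · have hxe : (x == elem) = false := by simp [hx]
        have hne : ¬ ((x == elem) = true) := by simp [hxe]
        have hrune : ∀ y ∈ run, ¬ y = elem := by
          intro y hy
          have := List.mem_takeWhile_imp hy
          simp [hxe] at this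
          exact this
        have hflat : run.flatMap (fun x => if x == elem then x :: sub else [x]) = run :=
          flatMap_id_of_no_elem sub elem run hrune
        have e1 : (if (x == elem) = true then ([] : List Int) else x :: run) = x :: run :=
          if_neg hne
        have e2 : (if (x :: run).isEmpty = true then (x :: run) ++ [elem] ++ sub else x :: run) =
            x :: run := if_neg (by simp)
        have e3 : (if (x == elem) = true then x :: sub else [x]) = [x] := if_neg hne
        rw [hxrr]
        simp only [List.map_cons, pvFlatten, List.flatMap_cons, e1, e2, e3,
          List.flatMap_append, hflat, List.length_append, List.length_cons]
        omega

-- with an adjacent duplicate of elem, A's _all output is strictly shorter than B's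
lemma Aall_len_lt (sub : List Int) (elem : Int) :
    ∀ lst : List Int, noAdj elem lst = false →
      (pvFlatten (((pvGroupby elem lst).map (fun kg => if kg.1 then [] else kg.2)).map
          (fun s => if s.isEmpty then s ++ [elem] ++ sub else s))).length <
        (lst.flatMap (fun x => if x == elem then x :: sub else [x])).length := by
  intro lst
  induction hn : lst.length using Nat.strong_induction_on generalizing lst with
  | _ n ih =>
    intro hna
    cases lst with
    | nil => simp [noAdj] at hna
    | cons x xs =>
      rw [pvGroupby]
      set run := xs.takeWhile (fun y => (y == elem) == (x == elem)) with hrun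
      set rest := xs.dropWhile (fun y => (y == elem) == (x == elem)) with hrest
      have hxrr : xs = run ++ rest := (List.takeWhile_append_dropWhile).symm
      have hlen : rest.length ≤ xs.length := List.length_dropWhile_le _ _
      by_cases hx : x = elem
      · have hxe : (x == elem) = true := by simp [hx]
        have e1 : (if (x == elem) = true then ([] : List Int) else x :: run) = [] := if_pos hxe
        have e2 : (if ([] : List Int).isEmpty = true then elem :: sub else []) =
            elem :: sub := if_pos rfl
        have e3 : (if (x == elem) = true then x :: sub else [x]) = x :: sub := if_pos hxe
        by_cases hre : run = []
        · -- the adjacent duplicate lies beyond this one-element run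
          cases xs with
          | nil => simp [noAdj] at hna
          | cons y r =>
              have hpy : ((y == elem) == (x == elem)) = false := by
                by_contra hb
                rw [Bool.not_eq_false] at hb
                have hrc : run = y :: List.takeWhile (fun z => (z == elem) == (x == elem)) r := by
                  rw [hrun]
                  simp [List.takeWhile_cons, hb]
                rw [hre] at hrc
                exact List.cons_ne_nil _ _ hrc.symm
              have hy : ¬ y = elem := by
                intro he
                rw [he, hxe] at hpy
                simp at hpy
              have hrest2 : rest = y :: r := by
                rw [hrest, List.dropWhile_cons_of_neg (by simp [hpy])]
              have hna2 : noAdj elem (y :: r) = false := by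
                have hb : (x == elem && y == elem) = false := by simp [hy]
                simp only [noAdj, hb, Bool.not_false, Bool.true_and] at hna
                exact hna
              have hrec := ih rest.length
                (by subst hn; simp only [List.length_cons] at hlen ⊢; omega) rest rfl
                (by rw [hrest2]; exact hna2)
              simp only [pvFlatten] at hrec
              have hflatnil : run.flatMap (fun x => if x == elem then x :: sub else [x]) = [] := by
                rw [hre]
                simp
              rw [hxrr]
              simp only [List.map_cons, pvFlatten, List.flatMap_cons, e1, e2, e3, hflatnil,
                List.flatMap_append, List.nil_append, List.singleton_append, List.length_append,
                List.length_cons, List.length_nil]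
              omega
        · -- a run of length ≥ 2 is collapsed: strictly shorter already here
          obtain ⟨y, r, hyr⟩ := List.exists_cons_of_ne_nil hre
          have hrune : ∀ z ∈ run, z = elem := by
            intro z hz
            have := List.mem_takeWhile_imp hz
            simp [hxe] at this
            exact this
          have hye : y = elem := hrune y (by rw [hyr]; exact List.mem_cons_self)
          have hrecle := Aall_len_le sub elem rest
          simp only [pvFlatten] at hrecle
          have hL : run.flatMap (fun x => if x == elem then x :: sub else [x]) =
              (elem :: sub) ++ r.flatMap (fun x => if x == elem then x :: sub else [x]) := by
            rw [hyr, List.flatMap_cons, hye]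
            simp
          rw [hxrr]
          simp only [List.map_cons, pvFlatten, List.flatMap_cons, e1, e2, e3, hL,
            List.flatMap_append, List.nil_append, List.singleton_append, List.length_append,
            List.length_cons]
          omega
      · have hxe : (x == elem) = false := by simp [hx]
        have hne : ¬ ((x == elem) = true) := by simp [hxe]
        have hrune : ∀ y ∈ run, ¬ y = elem := by
          intro y hy
          have := List.mem_takeWhile_imp hy
          simp [hxe] at this
          exact this
        have hflat : run.flatMap (fun x => if x == elem then x :: sub else [x]) = run :=
          flatMap_id_of_no_elem sub elem run hrune
        have hna2 : noAdj elem xs = false := by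
          cases xs with
          | nil => simp [noAdj] at hna
          | cons y r =>
              have hb : (x == elem && y == elem) = false := by simp [hx]
              simp only [noAdj, hb, Bool.not_false, Bool.true_and] at hna
              exact hna
        have hna3 : noAdj elem rest = false := by
          rw [hrest]
          refine noAdj_dropWhile_false elem _ (fun y hy => ?_) xs hna2
          intro he
          rw [he, hxe] at hy
          simp at hy
        have hrec := ih rest.length (by subst hn; simp; omega) rest rfl hna3
        simp only [pvFlatten] at hrec
        have e1 : (if (x == elem) = true then ([] : List Int) else x :: run) = x :: run :=
          if_neg hne
        have e2 : (if (x :: run).isEmpty = true then (x :: run) ++ [elem] ++ sub else x :: run) =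
            x :: run := if_neg (by simp)
        have e3 : (if (x == elem) = true then x :: sub else [x]) = [x] := if_neg hne
        rw [hxrr]
        simp only [List.map_cons, pvFlatten, List.flatMap_cons, e1, e2, e3,
          List.flatMap_append, hflat, List.length_append, List.length_cons]
        omega

-- ===== VERDICT (by name: the statement is the Claim_ definition above) =====
theorem insert_after_spec : Claim_unchanged_insert_after := by
  intro lst sub elem _all _hdom hpre hnd
  cases _all with
  | false =>
      -- first-occurrence path
      have hmem : elem ∈ lst := by
        rcases hpre with h | h
        · exact absurd h (by simp)
        · exact h
      obtain ⟨k, hk⟩ := Option.isSome_iff_exists.mp ((PySem.List.index?_isSome_iff lst elem).mpr hmem)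
      obtain ⟨pre, suf, hsplit, hlenp, hnp⟩ := (PySem.List.index?_eq_some_iff _ _ _).mp hk
      subst hsplit
      subst hlenp
      unfold insert_after
      rw [if_pos rfl, hk]
      show PySem.List.slice (pre ++ elem :: suf) none (some ((pre.length : Int) + 1)) ++ sub ++
          PySem.List.slice (pre ++ elem :: suf) (some ((pre.length : Int) + 1)) none =
        insert_after_alt (pre ++ elem :: suf) sub elem false
      have hcast : ((pre.length : Int) + 1) = ((pre.length + 1 : Nat) : Int) := by push_cast; ring
      rw [hcast, PySem.List.slice_to_natCast, PySem.List.slice_from_natCast]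
      have hsplit2 : pre ++ elem :: suf = (pre ++ [elem]) ++ suf := by simp
      rw [hsplit2, List.take_left' (by simp), List.drop_left' (by simp)]
      rw [alt_eq_foldl]
      rw [show (pre ++ [elem]) ++ suf = pre ++ ([elem] ++ suf) by simp]
      rw [List.foldl_append, List.foldl_append, altF_no_elem sub elem false pre [] hnp]
      simp only [List.nil_append, List.foldl_cons, List.foldl_nil, altF]
      rw [if_pos (by simp)]
      simp only [Bool.false_eq_true, if_false]
      rw [altF_done]
  | true =>
      have hNA : noAdj elem lst = true := by
        apply noAdj_of_not_D
        intro hex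
        exact hnd ⟨rfl, hex⟩
      unfold insert_after
      rw [if_neg (by simp)]
      rw [alt_eq_foldl, altF_all]
      simpa using (Aall_eq sub elem lst hNA)

theorem insert_after_changed : Claim_changed_insert_after := by
  unfold Claim_changed_insert_after
  refine ⟨by decide, by decide, by decide, ?_, by decide, by decide⟩
  show insert_after [1, 1, 2] [9] 1 true = [1, 9, 2]
  norm_num [insert_after, pvGroupby, pvFlatten]

@[simp] theorem insert_after_raises : Claim_raises_insert_after := by
  unfold Claim_raises_insert_after
  constructor
  · intro lst sub elem _all _hd ⟨ha, hm⟩ hpre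
    rcases hpre with h | h
    · rw [ha] at h; exact absurd h (by simp)
    · exact hm h
  · exact ⟨by decide, by decide, by decide⟩

theorem insert_after_tight : Claim_exact_insert_after := by
  intro lst sub elem _all _hdom _hpre hd heq
  obtain ⟨hall, p, hp, h1, h2⟩ := hd
  subst hall
  have hna : noAdj elem lst = false := by
    by_contra hb
    rw [Bool.not_eq_false] at hb
    exact noAdj_true_no_adj elem lst hb p hp ⟨h1, h2⟩
  have hlt := Aall_len_lt sub elem lst hna
  rw [alt_eq_foldl] at heq
  have hB := altF_all sub elem lst []
  unfold insert_after at heq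
  rw [if_neg (by simp)] at heq
  rw [heq, hB] at hlt
  simp at hlt
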